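-- pv_equiv track=rewrite | github.com/kwzgit/fenzhen | medical_entity_recognition/bilstm_crf/data.py | get_entity_key
-- ===== SOURCE A (Python) =====
-- def get_entity_key(tag_seq, char_seq, key):
--     entities = []
--     entity = ''
--     for (char, tag) in zip(char_seq, tag_seq):
--         if tag == 'B-' + key or tag == 'I-' + key or tag == 'E-' + key:
--             entity += char
--         else:
--             if len(entity) != 0:
--                 entities.append(entity)
--                 entity = ''
--     if len(entity) != 0:
--         entities.append(entity)
--     return entities
-- ===== SOURCE B (Python) =====
-- from itertools import groupby
--
-- def get_entity_key(tag_seq, char_seq, key):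
--     targets = ('B-' + key, 'I-' + key, 'E-' + key)
--     entities = []
--     for inside, grp in groupby(zip(char_seq, tag_seq), key=lambda ct: ct[1] in targets):
--         if inside:
--             entity = ''.join(c for c, _ in grp)
--             if entity:
--                 entities.append(entity)
--     return entities
-- ===== Notes on version B (the rewrite author's own statement) =====
-- stated objective: idiomatic
-- what changed: Replaces the explicit accumulator-with-flush loop by itertools.groupby on an 'inside entity' predicate over zip(char_seq, tag_seq), joining each matching run at once with ''.join instead of repeated string +=.
import Mathlib
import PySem

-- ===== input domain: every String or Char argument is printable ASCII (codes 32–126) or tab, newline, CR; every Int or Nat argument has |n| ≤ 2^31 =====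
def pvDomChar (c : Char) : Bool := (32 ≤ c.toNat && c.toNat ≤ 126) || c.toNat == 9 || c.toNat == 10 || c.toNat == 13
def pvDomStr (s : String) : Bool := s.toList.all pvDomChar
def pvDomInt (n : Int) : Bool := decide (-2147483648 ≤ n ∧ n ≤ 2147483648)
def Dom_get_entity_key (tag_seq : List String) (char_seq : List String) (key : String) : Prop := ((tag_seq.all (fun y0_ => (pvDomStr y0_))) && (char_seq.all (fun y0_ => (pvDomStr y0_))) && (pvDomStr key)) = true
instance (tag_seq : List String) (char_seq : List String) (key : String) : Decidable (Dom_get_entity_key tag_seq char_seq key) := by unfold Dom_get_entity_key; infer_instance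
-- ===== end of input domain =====

-- B re-implements the single accumulator loop as run-grouping (itertools.groupby on an
-- "inside entity" predicate), joining each matching run at once; same return value.

-- ===== PORT A =====
-- the loop body of A: state = (entities, entity)
def pvStepA (key : String) (s : List String × String) (ct : String × String) : List String × String :=
  if ct.2 == "B-" ++ key || ct.2 == "I-" ++ key || ct.2 == "E-" ++ key then
    (s.1, s.2 ++ ct.1)
  else
    if s.2.length ≠ 0 then (s.1 ++ [s.2], "") else (s.1, s.2)

def get_entity_key (tag_seq : List String) (char_seq : List String) (key : String) : List String :=
  let st := (char_seq.zip tag_seq).foldl (pvStepA key) ([], "")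
  if st.2.length ≠ 0 then st.1 ++ [st.2] else st.1

-- ===== PORT B =====
-- '.2 ∈ targets' predicate of Source B
def pvInEntity (key : String) (tag : String) : Bool :=
  tag == "B-" ++ key || tag == "I-" ++ key || tag == "E-" ++ key

-- groupby over the zipped stream: each maximal run with inEntity-true tags is joined;
-- a run joining to '' is skipped (Source B's `if entity:`); false runs are skipped.
def pvGroupRuns (p : String → Bool) : List (String × String) → List String
  | [] => []
  | (c, t) :: rest =>
    if p t then
      let run := (c, t) :: rest.takeWhile (fun ct => p ct.2)
      let s := (run.map Prod.fst).foldl (· ++ ·) ""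
      let rest' := rest.dropWhile (fun ct => p ct.2)
      if s.length ≠ 0 then s :: pvGroupRuns p rest' else pvGroupRuns p rest'
    else pvGroupRuns p rest
  termination_by l => l.length
  decreasing_by
    · simpa using Nat.lt_succ_of_le (List.length_dropWhile_le _ _)
    · simpa using Nat.lt_succ_of_le (List.length_dropWhile_le _ _)
    · simp

def get_entity_key_alt (tag_seq : List String) (char_seq : List String) (key : String) : List String :=
  pvGroupRuns (pvInEntity key) (char_seq.zip tag_seq)

-- ===== PRECONDITION & SPEC =====
def Spec_get_entity_key (tag_seq : List String) (char_seq : List String) (key : String) (out : List String) : Prop := out = get_entity_key_alt tag_seq char_seq key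
instance (tag_seq : List String) (char_seq : List String) (key : String) (out : List String) : Decidable (Spec_get_entity_key tag_seq char_seq key out) := by unfold Spec_get_entity_key; infer_instance

-- ===== CLAIM (what is proved, stated in full; the proofs are below) =====
def Claim_equal_get_entity_key : Prop := ∀ (tag_seq : List String) (char_seq : List String) (key : String), Dom_get_entity_key tag_seq char_seq key → Spec_get_entity_key tag_seq char_seq key (get_entity_key tag_seq char_seq key)

-- ===== LEMMAS AND PROOFS =====

-- A's loop, written as structural recursion carrying only the current entity
def pvG (p : String → Bool) (cur : String) : List (String × String) → List String
  | [] => if cur.length ≠ 0 then [cur] else []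
  | (c, t) :: rest =>
    if p t then pvG p (cur ++ c) rest
    else if cur.length ≠ 0 then cur :: pvG p "" rest else pvG p cur rest

-- B mid-run: the rest of the current run is folded onto cur, then B continues
def pvH (p : String → Bool) (cur : String) (l : List (String × String)) : List String :=
  let s := (l.takeWhile (fun ct => p ct.2)).foldl (fun a ct => a ++ ct.1) cur
  let rest := l.dropWhile (fun ct => p ct.2)
  if s.length ≠ 0 then s :: pvGroupRuns p rest else pvGroupRuns p rest

theorem pvH_empty (p : String → Bool) (l : List (String × String)) :
    pvH p "" l = pvGroupRuns p l := by
  cases l with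
  | nil => simp [pvH, pvGroupRuns]
  | cons ct rest =>
    obtain ⟨c, t⟩ := ct
    by_cases h : p t = true
    · simp [pvH, pvGroupRuns, h, List.foldl_map]
    · simp [pvH, pvGroupRuns, h]

theorem pvG_eq_pvH (p : String → Bool) (l : List (String × String)) (cur : String) :
    pvG p cur l = pvH p cur l := by
  induction l generalizing cur with
  | nil => simp [pvG, pvH, pvGroupRuns]
  | cons ct rest ih =>
    obtain ⟨c, t⟩ := ct
    by_cases h : p t = true
    · simp only [pvG, pvH, h, if_true, List.takeWhile_cons, List.dropWhile_cons,
        List.foldl_cons]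
      exact ih (cur ++ c)
    · by_cases hc : cur.length ≠ 0
      · have hne : cur ≠ "" := by intro e; subst e; simp at hc
        simp only [pvG, pvH, h, Bool.false_eq_true, if_false, hc, if_true,
          List.takeWhile_cons, List.dropWhile_cons, List.foldl_nil]
        rw [ih "", pvH_empty]
        have hgr : pvGroupRuns p ((c, t) :: rest) = pvGroupRuns p rest := by
          simp [pvGroupRuns, h]
        simp [hgr, hne]
      · have hcur : cur = "" := by
          simp only [ne_eq, not_not] at hc; simpa using hc
        subst hcur
        simp only [pvG, pvH, h, Bool.false_eq_true, if_false, hc, ite_false,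
          List.takeWhile_cons, List.dropWhile_cons, List.foldl_nil]
        rw [ih "", pvH_empty]
        have : pvGroupRuns p ((c, t) :: rest) = pvGroupRuns p rest := by
          simp [pvGroupRuns, h]
        simp [this, pvH_empty]

-- the foldl of A, finished with its final flush, is pvG
theorem pvFoldA_eq_pvG (key : String) (l : List (String × String))
    (acc : List String) (cur : String) :
    (let st := l.foldl (pvStepA key) (acc, cur);
     if st.2.length ≠ 0 then st.1 ++ [st.2] else st.1)
    = acc ++ pvG (pvInEntity key) cur l := by
  induction l generalizing acc cur with
  | nil =>
    by_cases hc : cur.length ≠ 0 <;> simp [pvG, hc]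
  | cons ct rest ih =>
    obtain ⟨c, t⟩ := ct
    by_cases h : pvInEntity key t = true
    · have hstep : pvStepA key (acc, cur) (c, t) = (acc, cur ++ c) := by
        simp [pvStepA, pvInEntity] at h ⊢
        intro h1 h2 h3
        rcases h with h | h | h <;> simp_all
      simp only [List.foldl_cons, hstep, pvG, h, if_true]
      exact ih acc (cur ++ c)
    · simp only [pvInEntity] at h
      obtain ⟨⟨h1, h2⟩, h3⟩ : (¬t = "B-" ++ key ∧ ¬t = "I-" ++ key) ∧ ¬t = "E-" ++ key := by
        simpa using h
      by_cases hc : cur.length ≠ 0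
      · have hne : cur ≠ "" := by intro e; subst e; simp at hc
        have hstep : pvStepA key (acc, cur) (c, t) = (acc ++ [cur], "") := by
          simp [pvStepA, h1, h2, h3, hc]
        have hB : pvInEntity key t = false := by simp [pvInEntity, h1, h2, h3]
        simp only [List.foldl_cons, hstep, pvG, hB, Bool.false_eq_true, if_false]
        rw [ih (acc ++ [cur]) ""]
        simp [hne]
      · have hcur : cur = "" := by
          simp only [ne_eq, not_not] at hc; simpa using hc
        subst hcur
        have hstep : pvStepA key (acc, "") (c, t) = (acc, "") := by
          simp [pvStepA, h1, h2, h3]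
        have hB : pvInEntity key t = false := by simp [pvInEntity, h1, h2, h3]
        simp only [List.foldl_cons, hstep, pvG, hB, Bool.false_eq_true, if_false,
          String.length_empty, ne_eq, not_true_eq_false, ite_false, not_false_eq_true]
        exact ih acc ""


-- ===== VERDICT (by name: the statement is the Claim_ definition above) =====
theorem get_entity_key_spec : Claim_equal_get_entity_key := by
  intro tag_seq char_seq key _
  unfold Spec_get_entity_key get_entity_key get_entity_key_alt
  rw [pvFoldA_eq_pvG key (char_seq.zip tag_seq) [] ""]
  rw [pvG_eq_pvH, pvH_empty]
  simp
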